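-- pv_equiv track=rewrite | github.com/StytsenkovaVS/NIRstytsenkova631_g6_only_connected_multithread_pool | main.py | find_minimum_dominating_sets
-- ===== SOURCE A (Python) =====
-- from itertools import combinations
--
-- def is_dominating_set(adj_matrix, subset):
--     n = len(adj_matrix)
--     dominated = set(subset)
--     for vertex in subset:
--         for neighbor in range(n):
--             if adj_matrix[vertex][neighbor] == 1:
--                 dominated.add(neighbor)
--     return len(dominated) == n
--
-- def find_minimum_dominating_sets(adj_matrix):
--     n = len(adj_matrix)
--     min_dominating_sets = []
--     for k in range(1, n + 1):
--         for subset in combinations(range(n), k):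
--             if is_dominating_set(adj_matrix, subset):
--                 if not min_dominating_sets or len(subset) == len(min_dominating_sets[0]):
--                     min_dominating_sets.append(subset)
--                 elif len(subset) < len(min_dominating_sets[0]):
--                     min_dominating_sets = [subset]
--         if min_dominating_sets:
--             break
--     return min_dominating_sets
-- ===== SOURCE B (Python) =====
-- def find_minimum_dominating_sets(adj_matrix):
--     n = len(adj_matrix)
--     full = (1 << n) - 1
--     masks = []
--     for v in range(n):
--         m = 1 << v
--         for u in range(n):
--             if adj_matrix[v][u] == 1:
--                 m |= 1 << u
--         masks.append(m)
--     best = n + 1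
--     results = []
--
--     def dfs(i, chosen, cov):
--         nonlocal best, results
--         if cov == full:
--             k = len(chosen)
--             if k < best:
--                 best = k
--                 results = [tuple(chosen)]
--             elif k == best:
--                 results.append(tuple(chosen))
--             return
--         if i == n or len(chosen) >= best:
--             return
--         chosen.append(i)
--         dfs(i + 1, chosen, cov | masks[i])
--         chosen.pop()
--         dfs(i + 1, chosen, cov)
--
--     dfs(0, [], 0)
--     return results
-- ===== Notes on version B (the rewrite author's own statement) =====
-- stated objective: alternative
-- what changed: B replaces A's breadth-first enumeration of all C(n,k) subsets per size k with a recursive include/exclude depth-first branch-and-bound over precomputed neighborhood bitmasks, pruning every branch whose chosen set already reaches the best size found; DFS preorder visits minimum-size dominating sets in exactly A's lexicographic order.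
-- intended difference: On the empty matrix A returns [] because its size loop starts at k=1, while B returns [[]]: the empty set vacuously dominates the empty graph and is its unique minimum dominating set, so B's value is the intended one. — e.g. on find_minimum_dominating_sets([]): A returns [], B returns [[]]
import Mathlib
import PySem

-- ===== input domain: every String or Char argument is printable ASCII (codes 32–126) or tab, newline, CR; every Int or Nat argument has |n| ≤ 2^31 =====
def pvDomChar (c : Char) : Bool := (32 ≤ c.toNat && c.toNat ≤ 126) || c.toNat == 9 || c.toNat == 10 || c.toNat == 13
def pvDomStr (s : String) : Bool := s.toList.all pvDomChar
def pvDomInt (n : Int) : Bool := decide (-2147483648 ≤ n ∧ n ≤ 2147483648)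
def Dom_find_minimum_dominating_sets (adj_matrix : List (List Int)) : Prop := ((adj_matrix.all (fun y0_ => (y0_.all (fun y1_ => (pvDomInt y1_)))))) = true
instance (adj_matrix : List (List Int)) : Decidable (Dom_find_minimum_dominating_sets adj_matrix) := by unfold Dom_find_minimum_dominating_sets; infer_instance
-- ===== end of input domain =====

-- B replaces A's breadth-first search by subset size (all C(n,k) combinations per size) with a
-- depth-first include/exclude branch-and-bound over precomputed neighborhood bitmasks
-- (objective: alternative algorithm; on the empty matrix B returns [[]] where A returns [], see D_).

-- ===== PORT A =====
-- adj[v][u] == 1  (matrix accessor; exact under Pre_, where indices are in range)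
def pvEntry (adj : List (List Int)) (v u : Int) : Bool :=
  PySem.List.pyGetD (PySem.List.pyGetD adj v []) u 0 == 1

def pvIsDominatingSet (adj : List (List Int)) (subset : List Int) : Bool :=
  let n := adj.length
  let dominated : PySem.Set Int :=
    subset.foldl (fun dom vertex =>
      (PySem.List.pyRange 0 (n : Int) 1).foldl (fun dom neighbor =>
        if pvEntry adj vertex neighbor then PySem.Set.add dom neighbor else dom) dom)
      (PySem.Set.ofList subset)
  PySem.Set.len dominated == (n : Int)

def pvLoopA (adj : List (List Int)) : List Int → List (List Int) → List (List Int)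
  | [], acc => acc
  | k :: ks, acc =>
    let acc' := (PySem.List.combinations (PySem.List.pyRange 0 (adj.length : Int) 1) k.toNat).foldl
      (fun mds subset =>
        if pvIsDominatingSet adj subset then
          if mds.isEmpty || (subset.length == (mds.headD []).length) then mds ++ [subset]
          else if subset.length < (mds.headD []).length then [subset] else mds
        else mds) acc
    if acc'.isEmpty then pvLoopA adj ks acc' else acc'

def find_minimum_dominating_sets (adj_matrix : List (List Int)) : List (List Int) :=
  pvLoopA adj_matrix (PySem.List.pyRange 1 ((adj_matrix.length : Int) + 1) 1) []

-- ===== PORT B =====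
-- closed-neighborhood bitmask of vertex v: bit v plus every u with adj[v][u] == 1
def pvCovAt (adj : List (List Int)) (v : Int) : Nat :=
  (PySem.List.pyRange 0 (adj.length : Int) 1).foldl
    (fun m u => if pvEntry adj v u then m ||| (1 <<< u.toNat) else m) (1 <<< v.toNat)

def pvCov (adj : List (List Int)) : List Nat :=
  (PySem.List.pyRange 0 (adj.length : Int) 1).map (pvCovAt adj)

-- dfs(i, chosen, cov) of Source B on state (best, results); the counter i runs 0..n and the
-- Python test 'i == n' is rendered by the extra argument fuel = n - i (fuel = 0 ↔ i = n)
def pvDfs (masks : List Nat) (full : Nat) : Nat → Nat → List Int → Nat →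
    Nat × List (List Int) → Nat × List (List Int)
  | fuel, i, chosen, cov, st =>
    if cov == full then
      if chosen.length < st.1 then (chosen.length, [chosen])
      else if chosen.length == st.1 then (st.1, st.2 ++ [chosen])
      else st
    else
      match fuel with
      | 0 => st
      | fuel' + 1 =>
        if st.1 ≤ chosen.length then st
        else
          let st₁ := pvDfs masks full fuel' (i + 1) (chosen ++ [(i : Int)])
            (cov ||| PySem.List.pyGetD masks (i : Int) 0) st
          pvDfs masks full fuel' (i + 1) chosen cov st₁

def find_minimum_dominating_sets_alt (adj_matrix : List (List Int)) : List (List Int) :=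
  let n := adj_matrix.length
  (pvDfs (pvCov adj_matrix) ((1 <<< n) - 1) n 0 [] 0 (n + 1, [])).2

-- ===== PRECONDITION & SPEC =====
-- Pre_ excludes exactly the ragged matrices with a row shorter than the number of rows,
-- on which Python A (and B) raises IndexError while scanning all n neighbor columns.
def Pre_find_minimum_dominating_sets (adj_matrix : List (List Int)) : Prop :=
  ∀ row ∈ adj_matrix, adj_matrix.length ≤ row.length
instance (adj_matrix : List (List Int)) : Decidable (Pre_find_minimum_dominating_sets adj_matrix) := by unfold Pre_find_minimum_dominating_sets; infer_instance
def pvWitness_find_minimum_dominating_sets : List (List Int) := [[0, 1], [1, 0]]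

-- On the empty matrix A returns [] (its size loop starts at k = 1 and never considers the empty
-- set) while B returns [[]]: the empty set dominates the empty graph vacuously and is its unique
-- minimum dominating set, so B's value is the intended one.
def D_find_minimum_dominating_sets (adj_matrix : List (List Int)) : Prop := adj_matrix = []
instance (adj_matrix : List (List Int)) : Decidable (D_find_minimum_dominating_sets adj_matrix) := by unfold D_find_minimum_dominating_sets; infer_instance

def Spec_find_minimum_dominating_sets (adj_matrix : List (List Int)) (out : List (List Int)) : Prop := ¬ D_find_minimum_dominating_sets adj_matrix → out = find_minimum_dominating_sets_alt adj_matrix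
instance (adj_matrix : List (List Int)) (out : List (List Int)) : Decidable (Spec_find_minimum_dominating_sets adj_matrix out) := by unfold Spec_find_minimum_dominating_sets; infer_instance

def pvDiffWitness_find_minimum_dominating_sets : List (List Int) := []
def pvDiffWitnessOut_find_minimum_dominating_sets : (List (List Int)) × (List (List Int)) := ([], [[]])

-- ===== CLAIM (what is proved, stated in full; the proofs are below) =====
def Claim_unchanged_find_minimum_dominating_sets : Prop := ∀ (adj_matrix : List (List Int)), Dom_find_minimum_dominating_sets adj_matrix → Pre_find_minimum_dominating_sets adj_matrix → Spec_find_minimum_dominating_sets adj_matrix (find_minimum_dominating_sets adj_matrix)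
def Claim_changed_find_minimum_dominating_sets : Prop := Dom_find_minimum_dominating_sets (pvDiffWitness_find_minimum_dominating_sets) ∧ Pre_find_minimum_dominating_sets (pvDiffWitness_find_minimum_dominating_sets) ∧ D_find_minimum_dominating_sets (pvDiffWitness_find_minimum_dominating_sets) ∧ find_minimum_dominating_sets (pvDiffWitness_find_minimum_dominating_sets) = pvDiffWitnessOut_find_minimum_dominating_sets.1 ∧ find_minimum_dominating_sets_alt (pvDiffWitness_find_minimum_dominating_sets) = pvDiffWitnessOut_find_minimum_dominating_sets.2 ∧ pvDiffWitnessOut_find_minimum_dominating_sets.1 ≠ pvDiffWitnessOut_find_minimum_dominating_sets.2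
def Claim_exact_find_minimum_dominating_sets : Prop := ∀ (adj_matrix : List (List Int)), Dom_find_minimum_dominating_sets adj_matrix → Pre_find_minimum_dominating_sets adj_matrix → D_find_minimum_dominating_sets adj_matrix → find_minimum_dominating_sets adj_matrix ≠ find_minimum_dominating_sets_alt adj_matrix

-- ===== LEMMAS AND PROOFS =====

-- proof-side abbreviations
def pvOrM (masks : List Nat) (cov : Nat) (c : List Int) : Nat :=
  c.foldl (fun m v => m ||| PySem.List.pyGetD masks v 0) cov

def pvStep (st : Nat × List (List Int)) (c : List Int) : Nat × List (List Int) :=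
  if c.length < st.1 then (c.length, [c])
  else if c.length == st.1 then (st.1, st.2 ++ [c])
  else st

-- the DFS tree's recorded leaves: minimal-completion increasing sequences over rem
def pvMF (masks : List Nat) (full : Nat) : Nat → List Int → List (List Int)
  | cov, [] => if cov == full then [[]] else []
  | cov, v :: rest =>
    if cov == full then [[]]
    else ((pvMF masks full (cov ||| PySem.List.pyGetD masks v 0) rest).map (v :: ·)) ++
      pvMF masks full cov rest

def pvM (b : Nat) (l : List (List Int)) : Nat := l.foldl (fun a c => min a c.length) b

def pvFirst (adj : List (List Int)) (masks : List Nat) (full : Nat) : List Int → List (List Int)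
  | [] => []
  | k :: ks =>
    let res := (PySem.List.combinations (PySem.List.pyRange 0 (adj.length : Int) 1) k.toNat).filter
      (fun c => pvOrM masks 0 c == full)
    if res.isEmpty then pvFirst adj masks full ks else res

theorem pv_mem_condAddFold (p : Int → Bool) (l : List Int) (s : PySem.Set Int) (y : Int) :
    y ∈ l.foldl (fun s x => if p x then PySem.Set.add s x else s) s ↔
      y ∈ s ∨ (y ∈ l ∧ p y = true) := by
  induction l generalizing s with
  | nil => simp
  | cons x t ih =>
    simp only [List.foldl_cons, ih, List.mem_cons]
    by_cases h : p x
    · simp only [h, if_pos, PySem.Set.mem_add]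
      constructor
      · rintro (⟨hy | rfl⟩ | ⟨ht, hp⟩) <;> tauto
      · rintro (hy | ⟨rfl | ht, hp⟩) <;> tauto
    · simp only [h, Bool.false_eq_true, if_false]
      constructor
      · rintro (hy | ⟨ht, hp⟩) <;> tauto
      · rintro (hy | ⟨rfl | ht, hp⟩) <;> tauto

theorem pv_nodup_condAddFold (p : Int → Bool) (l : List Int) (s : PySem.Set Int)
    (hs : s.Nodup) : (l.foldl (fun s x => if p x then PySem.Set.add s x else s) s).Nodup := by
  induction l generalizing s with
  | nil => exact hs
  | cons x t ih =>
    simp only [List.foldl_cons]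
    apply ih
    split
    · exact PySem.Set.nodup_add _ _ hs
    · exact hs

theorem pv_mem_dominated (adj : List (List Int)) (c : List Int) (s : PySem.Set Int) (u : Int) :
    u ∈ c.foldl (fun dom vertex =>
        (PySem.List.pyRange 0 (adj.length : Int) 1).foldl (fun dom neighbor =>
          if pvEntry adj vertex neighbor then PySem.Set.add dom neighbor else dom) dom) s ↔
      u ∈ s ∨ ∃ v ∈ c, (0 ≤ u ∧ u < (adj.length : Int)) ∧ pvEntry adj v u = true := by
  induction c generalizing s with
  | nil => simp
  | cons x t ih =>
    simp only [List.foldl_cons, ih, pv_mem_condAddFold, PySem.List.mem_pyRange_one,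
      List.mem_cons]
    constructor
    · rintro ((hy | ⟨⟨h0, hn⟩, hp⟩) | ⟨v, hv, hb, hp⟩)
      · tauto
      · exact Or.inr ⟨x, Or.inl rfl, ⟨h0, hn⟩, hp⟩
      · exact Or.inr ⟨v, Or.inr hv, hb, hp⟩
    · rintro (hy | ⟨v, rfl | hv, hb, hp⟩)
      · tauto
      · exact Or.inl (Or.inr ⟨hb, hp⟩)
      · exact Or.inr ⟨v, hv, hb, hp⟩

theorem pv_nodup_dominated (adj : List (List Int)) (c : List Int) (s : PySem.Set Int)
    (hs : s.Nodup) :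
    (c.foldl (fun dom vertex =>
        (PySem.List.pyRange 0 (adj.length : Int) 1).foldl (fun dom neighbor =>
          if pvEntry adj vertex neighbor then PySem.Set.add dom neighbor else dom) dom) s).Nodup := by
  induction c generalizing s with
  | nil => exact hs
  | cons x t ih =>
    simp only [List.foldl_cons]
    exact ih _ (pv_nodup_condAddFold _ _ _ hs)

theorem pv_length_eq_iff_superset {d R : List Int} (hd : d.Nodup) (hR : R.Nodup)
    (hsub : d ⊆ R) : d.length = R.length ↔ ∀ y ∈ R, y ∈ d := by
  constructor
  · intro hlen y hy
    have hperm := List.Subperm.perm_of_length_le (List.subperm_of_subset hd hsub) (le_of_eq hlen.symm)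
    exact hperm.mem_iff.mpr hy
  · intro hsup
    have h1 := List.Subperm.length_le (List.subperm_of_subset hd hsub)
    have h2 := List.Subperm.length_le (List.subperm_of_subset hR hsup)
    omega

theorem pv_testBit_shiftOne (k i : Nat) : (1 <<< k).testBit i = decide (k = i) := by
  simp only [Nat.shiftLeft_eq, one_mul, Nat.testBit_two_pow]

theorem pv_testBit_condOrFold (p : Int → Bool) (g : Int → Nat) (l : List Int) (m₀ : Nat) (i : Nat) :
    (l.foldl (fun m u => if p u then m ||| g u else m) m₀).testBit i =
      (m₀.testBit i || l.any (fun u => p u && (g u).testBit i)) := by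
  induction l generalizing m₀ with
  | nil => simp
  | cons x t ih =>
    simp only [List.foldl_cons, List.any_cons, ih]
    by_cases h : p x
    · simp [h, Nat.testBit_or, Bool.or_assoc]
    · simp [h]

theorem pv_testBit_orM (masks : List Nat) (cov : Nat) (c : List Int) (i : Nat) :
    (pvOrM masks cov c).testBit i =
      (cov.testBit i || c.any (fun v => (PySem.List.pyGetD masks v 0).testBit i)) := by
  unfold pvOrM
  induction c generalizing cov with
  | nil => simp
  | cons x t ih => simp [List.foldl_cons, ih, Nat.testBit_or, Bool.or_assoc]

theorem pv_testBit_covAt (adj : List (List Int)) (v : Int) (i : Nat) :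
    (pvCovAt adj v).testBit i = true ↔
      v.toNat = i ∨ ∃ u : Int, (0 ≤ u ∧ u < (adj.length : Int)) ∧ pvEntry adj v u = true ∧ u.toNat = i := by
  unfold pvCovAt
  rw [pv_testBit_condOrFold]
  simp only [Bool.or_eq_true, List.any_eq_true, Bool.and_eq_true, pv_testBit_shiftOne,
    decide_eq_true_eq, PySem.List.mem_pyRange_one]

theorem pv_test_equiv (adj : List (List Int)) (k : Nat) (c : List Int)
    (hc : c ∈ PySem.List.combinations (PySem.List.pyRange 0 (adj.length : Int) 1) k) :
    pvIsDominatingSet adj c = (pvOrM (pvCov adj) 0 c == (1 <<< adj.length) - 1) := by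
  obtain ⟨hsubl, hlen⟩ := (PySem.List.mem_combinations_iff _ _ _).mp hc
  have hcnd : c.Nodup := hsubl.nodup (PySem.List.nodup_pyRange_one _ _)
  have hcsub : c ⊆ PySem.List.pyRange 0 (adj.length : Int) 1 := hsubl.subset
  have hbound : ∀ v ∈ c, 0 ≤ v ∧ v < (adj.length : Int) := fun v hv =>
    PySem.List.mem_pyRange_one.mp (hcsub hv)
  apply Bool.coe_iff_coe.mp
  have hA : pvIsDominatingSet adj c = true ↔
      ∀ i : Nat, i < adj.length → ((i : Int) ∈ c ∨ ∃ v ∈ c, pvEntry adj v (i : Int) = true) := by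
    unfold pvIsDominatingSet
    simp only [beq_iff_eq, PySem.Set.len, Int.natCast_inj]
    have hDnd := pv_nodup_dominated adj c (PySem.Set.ofList c) (PySem.Set.nodup_ofList c)
    have hDsub : (c.foldl (fun dom vertex =>
        (PySem.List.pyRange 0 (adj.length : Int) 1).foldl (fun dom neighbor =>
          if pvEntry adj vertex neighbor then PySem.Set.add dom neighbor else dom) dom)
        (PySem.Set.ofList c)) ⊆ PySem.List.pyRange 0 (adj.length : Int) 1 := by
      intro u hu
      rw [pv_mem_dominated] at hu
      rcases hu with hu | ⟨v, hv, hb, _⟩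
      · exact hcsub ((PySem.Set.mem_ofList _ _).mp hu)
      · exact PySem.List.mem_pyRange_one.mpr hb
    have hRlen : (PySem.List.pyRange 0 (adj.length : Int) 1).length = adj.length := by
      rw [PySem.List.length_pyRange_one]; omega
    have key := pv_length_eq_iff_superset hDnd (PySem.List.nodup_pyRange_one _ _) hDsub
    refine Iff.trans ⟨fun h => key.mp (h.trans hRlen.symm), fun h => (key.mpr h).trans hRlen⟩ ?_
    constructor
    · intro h i hi
      have hmem : (i : Int) ∈ PySem.List.pyRange 0 (adj.length : Int) 1 :=
        PySem.List.mem_pyRange_one.mpr ⟨by omega, by exact_mod_cast hi⟩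
      have := h _ hmem
      rw [pv_mem_dominated] at this
      rcases this with hu | ⟨v, hv, _, hp⟩
      · exact Or.inl ((PySem.Set.mem_ofList _ _).mp hu)
      · exact Or.inr ⟨v, hv, hp⟩
    · intro h y hy
      obtain ⟨h0, hn⟩ := PySem.List.mem_pyRange_one.mp hy
      have hyi : y = ((y.toNat : Nat) : Int) := by omega
      have hi : y.toNat < adj.length := by omega
      rw [pv_mem_dominated]
      rcases h y.toNat hi with hm | ⟨v, hv, hp⟩
      · exact Or.inl ((PySem.Set.mem_ofList _ _).mpr (by rwa [hyi]))
      · exact Or.inr ⟨v, hv, ⟨h0, hn⟩, by rwa [hyi]⟩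
  have hB : (pvOrM (pvCov adj) 0 c == (1 <<< adj.length) - 1) = true ↔
      ∀ i : Nat, i < adj.length → ((i : Int) ∈ c ∨ ∃ v ∈ c, pvEntry adj v (i : Int) = true) := by
    rw [beq_iff_eq]
    have hfull : (1 <<< adj.length) - 1 = 2 ^ adj.length - 1 := by
      simp [Nat.shiftLeft_eq]
    constructor
    · intro heq i hi
      have hbit := congrArg (Nat.testBit · i) heq
      simp only [hfull, Nat.testBit_two_pow_sub_one, hi, decide_true] at hbit
      rw [pv_testBit_orM, Nat.zero_testBit, Bool.false_or, List.any_eq_true] at hbit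
      obtain ⟨v, hv, hb⟩ := hbit
      obtain ⟨h0, hn⟩ := hbound v hv
      rw [show pvCov adj = (PySem.List.pyRange 0 (adj.length : Int) 1).map (pvCovAt adj) from rfl,
        PySem.List.pyGetD_map_pyRange_of_nonneg (pvCovAt adj) _ v 0 h0 hn] at hb
      rcases (pv_testBit_covAt adj v i).mp hb with hvi | ⟨u, ⟨hu0, hun⟩, hp, hui⟩
      · exact Or.inl (by rwa [show ((i : Nat) : Int) = v by omega])
      · exact Or.inr ⟨v, hv, by rwa [show ((i : Nat) : Int) = u by omega]⟩
    · intro h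
      apply Nat.eq_of_testBit_eq
      intro i
      rw [pv_testBit_orM, Nat.zero_testBit, Bool.false_or, hfull, Nat.testBit_two_pow_sub_one]
      by_cases hi : i < adj.length
      · simp only [hi, decide_true, List.any_eq_true]
        rcases h i hi with hm | ⟨v, hv, hp⟩
        · refine ⟨(i : Int), hm, ?_⟩
          obtain ⟨h0, hn⟩ := hbound _ hm
          rw [show pvCov adj = (PySem.List.pyRange 0 (adj.length : Int) 1).map (pvCovAt adj) from rfl,
            PySem.List.pyGetD_map_pyRange_of_nonneg (pvCovAt adj) _ _ 0 h0 hn]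
          exact (pv_testBit_covAt adj _ i).mpr (Or.inl (by omega))
        · refine ⟨v, hv, ?_⟩
          obtain ⟨h0, hn⟩ := hbound _ hv
          rw [show pvCov adj = (PySem.List.pyRange 0 (adj.length : Int) 1).map (pvCovAt adj) from rfl,
            PySem.List.pyGetD_map_pyRange_of_nonneg (pvCovAt adj) _ _ 0 h0 hn]
          exact (pv_testBit_covAt adj v i).mpr
            (Or.inr ⟨(i : Int), ⟨by omega, by exact_mod_cast hi⟩, hp, by omega⟩)
      · simp only [hi, decide_false]
        rw [List.any_eq_false]
        intro v hv
        obtain ⟨h0, hn⟩ := hbound v hv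
        rw [show pvCov adj = (PySem.List.pyRange 0 (adj.length : Int) 1).map (pvCovAt adj) from rfl,
          PySem.List.pyGetD_map_pyRange_of_nonneg (pvCovAt adj) _ _ 0 h0 hn]
        rw [pv_testBit_covAt]
        rintro (hvi | ⟨u, ⟨hu0, hun⟩, _, hui⟩) <;> omega
  exact hA.trans hB.symm

theorem pv_foldA_eq (adj : List (List Int)) (k : Nat) (l : List (List Int))
    (hl : ∀ c ∈ l, c.length = k) (acc : List (List Int)) (hacc : ∀ c ∈ acc, c.length = k) :
    l.foldl (fun mds subset =>
        if pvIsDominatingSet adj subset then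
          if mds.isEmpty || (subset.length == (mds.headD []).length) then mds ++ [subset]
          else if subset.length < (mds.headD []).length then [subset] else mds
        else mds) acc = acc ++ l.filter (pvIsDominatingSet adj) := by
  induction l generalizing acc with
  | nil => simp
  | cons c t ih =>
    have hstep : (if pvIsDominatingSet adj c then
          if acc.isEmpty || (c.length == (acc.headD []).length) then acc ++ [c]
          else if c.length < (acc.headD []).length then [c] else acc
        else acc) = if pvIsDominatingSet adj c then acc ++ [c] else acc := by
      by_cases hd : pvIsDominatingSet adj c
      · simp only [hd, if_true]
        cases acc with
        | nil => simp
        | cons a as =>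
          have ha : a.length = k := hacc a (List.mem_cons_self)
          have hck : c.length = k := hl c (List.mem_cons_self)
          simp [ha, hck]
      · simp [hd]
    simp only [List.foldl_cons, hstep]
    by_cases hd : pvIsDominatingSet adj c
    · simp only [hd, if_true, List.filter_cons]
      rw [ih (fun x hx => hl x (List.mem_cons_of_mem _ hx))
        (acc ++ [c]) (by
          intro x hx
          rcases List.mem_append.mp hx with hx | hx
          · exact hacc x hx
          · obtain rfl := List.mem_singleton.mp hx; exact hl _ List.mem_cons_self)]
      simp
    · simp only [hd, Bool.false_eq_true, if_false, List.filter_cons]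
      rw [ih (fun x hx => hl x (List.mem_cons_of_mem _ hx)) acc hacc]

theorem pv_loopA_eq_first (adj : List (List Int)) (ks : List Int) :
    pvLoopA adj ks [] = pvFirst adj (pvCov adj) ((1 <<< adj.length) - 1) ks := by
  induction ks with
  | nil => rfl
  | cons k t ih =>
    simp only [pvLoopA, pvFirst]
    have hfold := pv_foldA_eq adj k.toNat
      (PySem.List.combinations (PySem.List.pyRange 0 (adj.length : Int) 1) k.toNat)
      (fun c hc => PySem.List.length_of_mem_combinations hc) [] (by simp)
    rw [List.nil_append] at hfold
    have hfilter :
        (PySem.List.combinations (PySem.List.pyRange 0 (adj.length : Int) 1) k.toNat).filter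
            (pvIsDominatingSet adj) =
          (PySem.List.combinations (PySem.List.pyRange 0 (adj.length : Int) 1) k.toNat).filter
            (fun c => pvOrM (pvCov adj) 0 c == (1 <<< adj.length) - 1) :=
      List.filter_congr (fun c hc => pv_test_equiv adj k.toNat c hc)
    rw [hfold, hfilter]
    by_cases he : ((PySem.List.combinations (PySem.List.pyRange 0 (adj.length : Int) 1) k.toNat).filter
        (fun c => pvOrM (pvCov adj) 0 c == (1 <<< adj.length) - 1)).isEmpty
    · rw [if_pos he, if_pos he, List.isEmpty_iff.mp he, ih]
    · rw [if_neg he, if_neg he]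

-- ===== the B side: DFS = fold of pvStep over the pvMF leaves =====

theorem pv_fold_noop (l : List (List Int)) (st : Nat × List (List Int))
    (h : ∀ c ∈ l, st.1 < c.length) : l.foldl pvStep st = st := by
  induction l with
  | nil => rfl
  | cons c t ih =>
    have hc := h c List.mem_cons_self
    have hstep : pvStep st c = st := by
      unfold pvStep
      rw [if_neg (by omega), if_neg (by simp; omega)]
    rw [List.foldl_cons, hstep]
    exact ih (fun x hx => h x (List.mem_cons_of_mem _ hx))

theorem pv_MF_ne_nil (masks : List Nat) (full cov : Nat) (rem : List Int)
    (hcov : cov ≠ full) : ∀ t ∈ pvMF masks full cov rem, t ≠ [] := by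
  induction rem generalizing cov with
  | nil => intro t ht; simp [pvMF, hcov] at ht
  | cons v rest ih =>
    intro t ht
    have hcov' : (cov == full) = false := by simpa using hcov
    simp only [pvMF, hcov', Bool.false_eq_true, if_false, List.mem_append, List.mem_map] at ht
    rcases ht with ⟨s, _, rfl⟩ | ht
    · simp
    · exact ih cov hcov t ht

theorem pv_dfs_eq_fold (masks : List Nat) (full : Nat) :
    ∀ (fuel i : Nat) (chosen : List Int) (cov : Nat) (st : Nat × List (List Int)),
    pvDfs masks full fuel i chosen cov st =
      ((pvMF masks full cov (PySem.List.pyRange (i : Int) ((i + fuel : Nat) : Int) 1)).map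
        (chosen ++ ·)).foldl pvStep st := by
  intro fuel
  induction fuel with
  | zero =>
    intro i chosen cov st
    rw [show ((i + 0 : Nat) : Int) = (i : Int) by omega, PySem.List.pyRange_one_eq_nil (le_refl _)]
    by_cases hcov : cov == full
    · simp only [pvDfs, hcov, if_true, pvMF, List.map_cons, List.map_nil, List.foldl_cons,
        List.foldl_nil, List.append_nil, pvStep]
    · simp only [pvDfs, hcov, pvMF, Bool.false_eq_true, if_false, List.map_nil, List.foldl_nil]
  | succ fuel ih =>
    intro i chosen cov st
    rw [PySem.List.pyRange_one_cons (by omega : (i : Int) < ((i + (fuel + 1) : Nat) : Int))]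
    by_cases hcov : cov == full
    · simp only [pvDfs, hcov, if_true, pvMF, List.map_cons, List.map_nil, List.foldl_cons,
        List.foldl_nil, List.append_nil, pvStep]
    · simp only [pvDfs, hcov, Bool.false_eq_true, if_false, pvMF]
      by_cases hpr : st.1 ≤ chosen.length
      · rw [if_pos hpr]
        refine (pv_fold_noop _ _ ?_).symm
        intro c hc
        simp only [List.mem_map, List.mem_append] at hc
        obtain ⟨t, ht, rfl⟩ := hc
        have htne : t ≠ [] := by
          rcases ht with ⟨s, _, rfl⟩ | ht
          · simp
          · exact pv_MF_ne_nil masks full cov _ (by simpa using hcov) t ht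
        have : 1 ≤ t.length := List.length_pos_iff.mpr htne
        simp only [List.length_append]
        omega
      · rw [if_neg hpr]
        have hcast : ((i : Int) + 1) = ((i + 1 : Nat) : Int) := by push_cast; ring
        have hcast2 : ((i + (fuel + 1) : Nat) : Int) = (((i + 1) + fuel : Nat) : Int) := by
          push_cast; ring
        rw [hcast, hcast2, List.map_append, List.foldl_append, List.map_map]
        rw [ih (i + 1) (chosen ++ [(i : Int)]) (cov ||| PySem.List.pyGetD masks (i : Int) 0) st,
          ih (i + 1) chosen cov _]
        congr 1
        congr 1
        apply List.map_congr_left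
        intro t _
        simp [Function.comp, List.append_assoc]

theorem pvM_le (b : Nat) (l : List (List Int)) : pvM b l ≤ b := by
  induction l generalizing b with
  | nil => exact le_refl _
  | cons c t ih =>
    calc pvM (min b c.length) t ≤ min b c.length := ih _
    _ ≤ b := Nat.min_le_left _ _

theorem pvM_le_mem (b : Nat) (l : List (List Int)) : ∀ c ∈ l, pvM b l ≤ c.length := by
  induction l generalizing b with
  | nil => intro c hc; cases hc
  | cons c t ih =>
    intro x hx
    rcases List.mem_cons.mp hx with rfl | hx
    · calc pvM (min b x.length) t ≤ min b x.length := pvM_le _ _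
      _ ≤ x.length := Nat.min_le_right _ _
    · exact ih _ x hx

theorem pvM_attained (b : Nat) (l : List (List Int)) :
    pvM b l = b ∨ ∃ c ∈ l, c.length = pvM b l := by
  induction l generalizing b with
  | nil => exact Or.inl rfl
  | cons c t ih =>
    rcases ih (min b c.length) with h | ⟨x, hx, hlen⟩
    · by_cases hc : c.length ≤ b
      · refine Or.inr ⟨c, List.mem_cons_self, ?_⟩
        show c.length = pvM (min b c.length) t
        omega
      · left
        show pvM (min b c.length) t = b
        omega
    · exact Or.inr ⟨x, List.mem_cons_of_mem _ hx, hlen⟩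

theorem pv_fold_step_eq (l : List (List Int)) (b : Nat) (r : List (List Int)) :
    l.foldl pvStep (b, r) =
      (pvM b l, (if pvM b l = b then r else []) ++ l.filter (fun c => c.length == pvM b l)) := by
  induction l generalizing b r with
  | nil => simp [pvM]
  | cons c t ih =>
    have hM : pvM b (c :: t) = pvM (min b c.length) t := rfl
    have hMle : pvM (min b c.length) t ≤ min b c.length := pvM_le _ _
    rw [List.foldl_cons, List.filter_cons, hM]
    by_cases h1 : c.length < b
    · have hstep : pvStep (b, r) c = (c.length, [c]) := by unfold pvStep; rw [if_pos h1]
      rw [hstep, ih]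
      have hmin : min b c.length = c.length := by omega
      rw [hmin] at hMle ⊢
      by_cases h2 : pvM c.length t = c.length
      · simp [h2, show ¬ (c.length = b) by omega]
      · have hlt : pvM c.length t < c.length := by omega
        simp only [show (pvM c.length t = c.length) = False by simp [h2], if_false,
          show (pvM c.length t = b) = False by simp; omega, List.nil_append,
          show (c.length == pvM c.length t) = false by simp; omega]
        simp
    · by_cases h2 : c.length = b
      · have hstep : pvStep (b, r) c = (b, r ++ [c]) := by
          unfold pvStep; rw [if_neg h1, if_pos (by simp [h2])]
        rw [hstep, ih]
        have hmin : min b c.length = b := by omega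
        rw [hmin] at hMle ⊢
        by_cases h3 : pvM b t = b
        · simp [h3, h2, List.append_assoc]
        · simp [h3, show (c.length == pvM b t) = false by simp; omega]
      · have hstep : pvStep (b, r) c = (b, r) := by
          unfold pvStep; rw [if_neg h1, if_neg (by simp; omega)]
        rw [hstep, ih]
        have hmin : min b c.length = b := by omega
        rw [hmin] at hMle ⊢
        simp [show (c.length == pvM b t) = false by simp; omega]

-- ===== pvMF versus combinations =====


theorem pv_MF_complete (masks : List Nat) (full : Nat) (rem : List Int) (cov : Nat)
    (s : List Int) (hsub : s.Sublist rem) (hor : pvOrM masks cov s = full) :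
    ∃ t ∈ pvMF masks full cov rem, t.length ≤ s.length := by
  induction rem generalizing cov s with
  | nil =>
    obtain rfl := List.sublist_nil.mp hsub
    refine ⟨[], ?_, le_refl _⟩
    simp only [pvOrM, List.foldl_nil] at hor
    simp [pvMF, hor]
  | cons v rest ih =>
    by_cases hcov : cov == full
    · exact ⟨[], by simp [pvMF, hcov], Nat.zero_le _⟩
    · rcases List.sublist_cons_iff.mp hsub with hs | ⟨s', rfl, hs'⟩
      · obtain ⟨t, ht, hlen⟩ := ih cov s hs hor
        exact ⟨t, by simp [pvMF, show (cov == full) = false by simpa using hcov, ht], hlen⟩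
      · have hor' : pvOrM masks (cov ||| PySem.List.pyGetD masks v 0) s' = full := by
          simpa [pvOrM] using hor
        obtain ⟨t, ht, hlen⟩ := ih _ s' hs' hor'
        refine ⟨v :: t, ?_, by simpa using Nat.succ_le_succ hlen⟩
        have hcov' : (cov == full) = false := by simpa using hcov
        simp only [pvMF, hcov', Bool.false_eq_true, if_false, List.mem_append, List.mem_map]
        exact Or.inl ⟨t, ht, rfl⟩

theorem pv_MF_filter_eq (masks : List Nat) (full : Nat) :
    ∀ (rem : List Int) (cov : Nat) (k : Nat),
    (∀ j < k, ∀ s ∈ PySem.List.combinations rem j, pvOrM masks cov s ≠ full) →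
    (pvMF masks full cov rem).filter (fun t => t.length == k) =
      (PySem.List.combinations rem k).filter (fun c => pvOrM masks cov c == full) := by
  intro rem
  induction rem with
  | nil =>
    intro cov k H
    by_cases hcov : cov == full
    · cases k with
      | zero =>
        simp [pvMF, PySem.List.combinations_zero, pvOrM, beq_iff_eq.mp hcov]
      | succ k =>
        exact absurd (by simpa [pvOrM] using beq_iff_eq.mp hcov)
          (H 0 (Nat.succ_pos _) [] (by simp [PySem.List.combinations_zero]))
    · have hcov' : (cov == full) = false := by simpa using hcov
      cases k with
      | zero =>
        simp [pvMF, hcov', PySem.List.combinations_zero, pvOrM]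
      | succ k =>
        simp [pvMF, hcov', PySem.List.combinations_nil_succ]
  | cons v rest ih =>
    intro cov k H
    by_cases hcov : cov == full
    · cases k with
      | zero =>
        simp [pvMF, PySem.List.combinations_zero, pvOrM, beq_iff_eq.mp hcov]
      | succ k =>
        exact absurd (by simpa [pvOrM] using beq_iff_eq.mp hcov)
          (H 0 (Nat.succ_pos _) [] (by simp [PySem.List.combinations_zero]))
    · have hcov' : (cov == full) = false := by simpa using hcov
      cases k with
      | zero =>
        rw [PySem.List.combinations_zero]
        have h1 : (pvMF masks full cov (v :: rest)).filter (fun t => t.length == 0) = [] := by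
          rw [List.filter_eq_nil_iff]
          intro t ht
          have := pv_MF_ne_nil masks full cov (v :: rest) (by simpa using hcov) t ht
          simp [List.length_eq_zero_iff, this]
        rw [h1, List.filter_cons]
        simp [pvOrM, hcov']
      | succ k =>
        rw [PySem.List.combinations_cons_succ, List.filter_append]
        simp only [pvMF, hcov', Bool.false_eq_true, if_false, List.filter_append]
        have hmap1 : ((pvMF masks full (cov ||| PySem.List.pyGetD masks v 0) rest).map
            (v :: ·)).filter (fun t => t.length == k + 1) =
            ((pvMF masks full (cov ||| PySem.List.pyGetD masks v 0) rest).filter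
              (fun t => t.length == k)).map (v :: ·) := by
          rw [List.filter_map]
          congr 1
          apply List.filter_congr
          intro t _
          simp [Function.comp]
        have hmap2 : ((PySem.List.combinations rest k).map (v :: ·)).filter
            (fun c => pvOrM masks cov c == full) =
            ((PySem.List.combinations rest k).filter
              (fun c => pvOrM masks (cov ||| PySem.List.pyGetD masks v 0) c == full)).map
              (v :: ·) := by
          rw [List.filter_map]
          rfl
        rw [hmap1, hmap2]
        have H1 : ∀ j < k, ∀ s ∈ PySem.List.combinations rest j,
            pvOrM masks (cov ||| PySem.List.pyGetD masks v 0) s ≠ full := by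
          intro j hj s hs hfull
          obtain ⟨hsub, hlen⟩ := (PySem.List.mem_combinations_iff _ _ _).mp hs
          refine H (j + 1) (by omega) (v :: s) ?_ (by simpa [pvOrM] using hfull)
          exact (PySem.List.mem_combinations_iff _ _ _).mpr
            ⟨List.Sublist.cons₂ _ hsub, by simp [hlen]⟩
        have H2 : ∀ j < k + 1, ∀ s ∈ PySem.List.combinations rest j,
            pvOrM masks cov s ≠ full := by
          intro j hj s hs
          obtain ⟨hsub, hlen⟩ := (PySem.List.mem_combinations_iff _ _ _).mp hs
          exact H j hj s ((PySem.List.mem_combinations_iff _ _ _).mpr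
            ⟨List.Sublist.cons _ hsub, hlen⟩)
        rw [ih _ k H1, ih cov (k + 1) H2]

-- ===== the full vertex set dominates =====

theorem pv_range_full (adj : List (List Int)) :
    pvOrM (pvCov adj) 0 (PySem.List.pyRange 0 (adj.length : Int) 1) = (1 <<< adj.length) - 1 := by
  have hfull : (1 <<< adj.length) - 1 = 2 ^ adj.length - 1 := by simp [Nat.shiftLeft_eq]
  apply Nat.eq_of_testBit_eq
  intro i
  rw [pv_testBit_orM, Nat.zero_testBit, Bool.false_or, hfull, Nat.testBit_two_pow_sub_one]
  by_cases hi : i < adj.length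
  · simp only [hi, decide_true, List.any_eq_true]
    refine ⟨(i : Int), PySem.List.mem_pyRange_one.mpr ⟨by omega, by exact_mod_cast hi⟩, ?_⟩
    rw [show pvCov adj = (PySem.List.pyRange 0 (adj.length : Int) 1).map (pvCovAt adj) from rfl,
      PySem.List.pyGetD_map_pyRange_of_nonneg (pvCovAt adj) _ _ 0 (by omega)
        (by exact_mod_cast hi)]
    exact (pv_testBit_covAt adj _ i).mpr (Or.inl (by omega))
  · simp only [hi, decide_false]
    rw [List.any_eq_false]
    intro v hv
    obtain ⟨h0, hn⟩ := PySem.List.mem_pyRange_one.mp hv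
    rw [show pvCov adj = (PySem.List.pyRange 0 (adj.length : Int) 1).map (pvCovAt adj) from rfl,
      PySem.List.pyGetD_map_pyRange_of_nonneg (pvCovAt adj) _ _ 0 h0 hn]
    rw [pv_testBit_covAt]
    rintro (hvi | ⟨u, ⟨hu0, hun⟩, _, hui⟩) <;> omega

-- ===== pvFirst reaches exactly the minimal size =====

theorem pv_first_eq (adj : List (List Int)) (masks : List Nat) (full : Nat) (M : Nat)
    (hM1 : 1 ≤ M) (hMn : M ≤ adj.length)
    (hne : ((PySem.List.combinations (PySem.List.pyRange 0 (adj.length : Int) 1) M).filter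
      (fun c => pvOrM masks 0 c == full)).isEmpty = false)
    (hempty : ∀ k : Nat, 1 ≤ k → k < M →
      (PySem.List.combinations (PySem.List.pyRange 0 (adj.length : Int) 1) k).filter
        (fun c => pvOrM masks 0 c == full) = []) :
    ∀ (d a : Nat), a + d = M → 1 ≤ a →
    pvFirst adj masks full (PySem.List.pyRange (a : Int) ((adj.length : Int) + 1) 1) =
      (PySem.List.combinations (PySem.List.pyRange 0 (adj.length : Int) 1) M).filter
        (fun c => pvOrM masks 0 c == full) := by
  intro d
  induction d with
  | zero =>
    intro a ha h1
    obtain rfl : M = a := by omega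
    rw [PySem.List.pyRange_one_cons (by omega : (M : Int) < (adj.length : Int) + 1)]
    simp only [pvFirst, Int.toNat_natCast]
    rw [if_neg (by rw [hne]; exact Bool.false_ne_true)]
  | succ d ih =>
    intro a ha h1
    rw [PySem.List.pyRange_one_cons (by omega : (a : Int) < (adj.length : Int) + 1)]
    simp only [pvFirst, Int.toNat_natCast]
    rw [if_pos (by rw [hempty a h1 (by omega)]; rfl),
      show ((a : Int) + 1) = ((a + 1 : Nat) : Int) by push_cast; ring]
    exact ih (a + 1) (by omega) (by omega)

-- ===== main equivalence on nonempty matrices =====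

theorem pv_main_eq (adj : List (List Int)) (hne : adj ≠ []) :
    find_minimum_dominating_sets adj = find_minimum_dominating_sets_alt adj := by
  have hn : 1 ≤ adj.length := List.length_pos_iff.mpr hne
  set n := adj.length with hn_def
  set masks := pvCov adj with hmasks
  set full := (1 <<< n) - 1 with hfull_def
  have hfull0 : (0 : Nat) ≠ full := by
    have h2 : 2 ≤ 1 <<< n := by
      rw [Nat.shiftLeft_eq, one_mul]
      have := Nat.one_lt_two_pow_iff.mpr (show n ≠ 0 by omega)
      omega
    omega
  set rem := PySem.List.pyRange 0 (n : Int) 1 with hrem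
  set L := pvMF masks full 0 rem with hL
  set M := pvM (n + 1) L with hM
  -- facts about M
  have hrem_len : rem.length = n := by
    rw [hrem, PySem.List.length_pyRange_one]; omega
  have hcomplete : ∃ t ∈ L, t.length ≤ n := by
    obtain ⟨t, ht, hlen⟩ := pv_MF_complete masks full rem 0 rem (List.Sublist.refl _)
      (by rw [hmasks, hfull_def, hrem, hn_def]; exact pv_range_full adj)
    exact ⟨t, ht, by rw [hrem_len] at hlen; exact hlen⟩
  have hMn : M ≤ n := by
    obtain ⟨t, ht, hlen⟩ := hcomplete
    calc M ≤ t.length := pvM_le_mem _ _ t ht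
    _ ≤ n := hlen
  have hM1 : 1 ≤ M := by
    rcases pvM_attained (n + 1) L with h | ⟨c, hc, hlen⟩
    · omega
    · have hcne : c ≠ [] := pv_MF_ne_nil masks full 0 rem hfull0 c hc
      have := List.length_pos_iff.mpr hcne
      omega
  have Hmin : ∀ j < M, ∀ s ∈ PySem.List.combinations rem j, pvOrM masks 0 s ≠ full := by
    intro j hj s hs hor
    obtain ⟨hsub, hlen⟩ := (PySem.List.mem_combinations_iff _ _ _).mp hs
    obtain ⟨t, ht, hlent⟩ := pv_MF_complete masks full rem 0 s hsub hor
    have := pvM_le_mem (n + 1) L t ht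
    omega
  have hfilter : L.filter (fun t => t.length == M) =
      (PySem.List.combinations rem M).filter (fun c => pvOrM masks 0 c == full) :=
    pv_MF_filter_eq masks full rem 0 M Hmin
  have hFne : ((PySem.List.combinations rem M).filter
      (fun c => pvOrM masks 0 c == full)).isEmpty = false := by
    rw [← hfilter]
    rcases pvM_attained (n + 1) L with h | ⟨c, hc, hlen⟩
    · omega
    · rw [← hM] at hlen
      have hmem : c ∈ L.filter (fun t => t.length == M) :=
        List.mem_filter.mpr ⟨hc, by simp [hlen]⟩
      simpa using List.ne_nil_of_mem hmem
  have hEmpty : ∀ k : Nat, 1 ≤ k → k < M →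
      (PySem.List.combinations rem k).filter (fun c => pvOrM masks 0 c == full) = [] := by
    intro k _ hk
    rw [List.filter_eq_nil_iff]
    intro c hc
    simpa using Hmin k hk c hc
  -- the A side
  have hA : find_minimum_dominating_sets adj =
      (PySem.List.combinations rem M).filter (fun c => pvOrM masks 0 c == full) := by
    unfold find_minimum_dominating_sets
    rw [pv_loopA_eq_first adj]
    rw [show (1 : Int) = ((1 : Nat) : Int) by rfl]
    exact pv_first_eq adj masks full M hM1 hMn hFne hEmpty (M - 1) 1 (by omega) (le_refl 1)
  -- the B side
  have hB : find_minimum_dominating_sets_alt adj = L.filter (fun t => t.length == M) := by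
    have halt : find_minimum_dominating_sets_alt adj =
        (pvDfs masks full n 0 [] 0 (n + 1, [])).2 := rfl
    rw [halt, pv_dfs_eq_fold masks full n 0 [] 0 (n + 1, [])]
    rw [show ((0 + n : Nat) : Int) = (n : Int) by omega]
    rw [show (PySem.List.pyRange ((0 : Nat) : Int) (n : Int) 1) = rem by rw [hrem]; norm_num]
    rw [show (pvMF masks full 0 rem).map (([] : List Int) ++ ·) = L by
      rw [hL]; simp]
    rw [pv_fold_step_eq L (n + 1) []]
    simp only [← hM]
    split <;> simp
  rw [hA, hB, hfilter]

-- ===== VERDICT (by name: the statements are the Claim_ definitions above) =====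
theorem find_minimum_dominating_sets_spec : Claim_unchanged_find_minimum_dominating_sets := by
  intro adj _ _ hD
  exact pv_main_eq adj hD

theorem find_minimum_dominating_sets_changed : Claim_changed_find_minimum_dominating_sets := by
  unfold Claim_changed_find_minimum_dominating_sets; decide

theorem find_minimum_dominating_sets_tight : Claim_exact_find_minimum_dominating_sets := by
  intro adj _ _ hD
  subst hD
  decide
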